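-- pv_equiv track=rewrite | github.com/saganz3ra/Pilhas | Pilhas/1) Recursiva.py | recursiva
-- ===== SOURCE A (Python) =====
-- def recursiva(N, pilha=[]):
--     if N == 0:
--
--         return 0
--     else:
--         pilha.append(N)
--         resultado = recursiva(N - 1, pilha)
--         soma = sum(pilha)
--         pilha.pop()
--         return soma
-- ===== SOURCE B (Python) =====
-- def recursiva(N, pilha=[]):
--     # Closed form: the balanced push/recurse/sum/pop collapses to sum(pilha) + N
--     # (and 0 at the base case N == 0), with no recursion and no mutation.
--     return 0 if N == 0 else sum(pilha) + N
-- ===== Notes on version B (the rewrite author's own statement) =====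
-- stated objective: faster
-- what changed: Replaces the O(N)-deep recursion with balanced append/pop and a full sum at each return by the closed form sum(pilha)+N (0 when N==0), since the stack is restored to pilha+[N] at the point sum is taken.
import Mathlib
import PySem

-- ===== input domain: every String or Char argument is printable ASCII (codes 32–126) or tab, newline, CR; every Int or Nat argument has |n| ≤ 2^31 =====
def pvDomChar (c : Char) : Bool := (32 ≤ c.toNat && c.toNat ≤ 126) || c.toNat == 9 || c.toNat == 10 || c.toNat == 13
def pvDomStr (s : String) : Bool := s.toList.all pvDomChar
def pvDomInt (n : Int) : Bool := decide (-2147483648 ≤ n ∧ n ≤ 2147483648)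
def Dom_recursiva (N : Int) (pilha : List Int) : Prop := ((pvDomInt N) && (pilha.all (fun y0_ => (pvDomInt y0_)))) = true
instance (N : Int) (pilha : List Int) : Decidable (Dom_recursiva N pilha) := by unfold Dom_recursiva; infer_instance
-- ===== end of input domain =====

-- B replaces A's O(N)-deep recursion (with its per-level sum) by the closed form
-- sum(pilha) + N (0 when N = 0). Note: Python A temporarily mutates pilha but
-- restores it before returning; equivalence here is about the return value.

-- ===== PORT A =====
-- Fuel = N.toNat: under Pre_ (N ≥ 0) each recursive call passes N-1, so the
-- fuel tracks N exactly; at each level N is (fuel : Int).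
def recursivaGo : Nat → List Int → Int
  | 0, _ => 0
  | Nat.succ n, pilha =>
      let pilha' := pilha ++ [((n : Int) + 1)]          -- pilha.append(N)
      let _resultado := recursivaGo n pilha'            -- recursiva(N-1, pilha)
      let soma := pilha'.sum                            -- sum(pilha) before pop
      soma                                              -- pop restores pilha; return soma

def recursiva (N : Int) (pilha : List Int) : Int :=
  recursivaGo N.toNat pilha

-- ===== PORT B =====
def recursiva_alt (N : Int) (pilha : List Int) : Int :=
  if N == 0 then 0 else pilha.sum + N

-- ===== PRECONDITION & SPEC =====
-- Pre_: N ≥ 0; for negative N the Python A recurses without reaching the base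
-- case and raises RecursionError.
def Pre_recursiva (N : Int) (pilha : List Int) : Prop := 0 ≤ N
instance (N : Int) (pilha : List Int) : Decidable (Pre_recursiva N pilha) := by
  unfold Pre_recursiva; infer_instance
def pvWitness_recursiva : Int × List Int := (3, [5, -2])

def Spec_recursiva (N : Int) (pilha : List Int) (out : Int) : Prop := out = recursiva_alt N pilha
instance (N : Int) (pilha : List Int) (out : Int) : Decidable (Spec_recursiva N pilha out) := by unfold Spec_recursiva; infer_instance

-- ===== CLAIM (what is proved, stated in full; the proofs are below) =====
def Claim_equal_recursiva : Prop := ∀ (N : Int) (pilha : List Int), Dom_recursiva N pilha → Pre_recursiva N pilha → Spec_recursiva N pilha (recursiva N pilha)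

-- ===== LEMMAS AND PROOFS =====
theorem recursivaGo_succ (n : Nat) (pilha : List Int) :
    recursivaGo (n + 1) pilha = pilha.sum + ((n : Int) + 1) := by
  simp [recursivaGo]

-- ===== VERDICT (by name: the statement is the Claim_ definition above) =====
theorem recursiva_spec : Claim_equal_recursiva := by
  intro N pilha _ hpre
  unfold Pre_recursiva at hpre
  unfold Spec_recursiva recursiva recursiva_alt
  rcases h : N.toNat with _ | n
  · have : N = 0 := by omega
    simp [this, recursivaGo]
  · have hN : N = (n : Int) + 1 := by omega
    have hne : (N == 0) = false := by simp only [beq_eq_false_iff_ne]; omega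
    rw [recursivaGo_succ, hne, hN]
    simp
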